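-- pv_equiv track=rewrite | github.com/banana-galaxy/challenges | challenge8(theater_escape)/qwerty.py | whichExit
-- ===== SOURCE A (Python) =====
-- def whichExit(theater):
--     for row in theater:
--         if 0 in row:
--             left = 0
--             right = 0
--             side = 'left'
--             for person in row:
--                 if person == 1 and side == 'left':
--                     left += 1
--                 elif person == 1 and side == 'right':
--                     right += 1
--                 elif person == 0 and side == 'left':
--                     side = 'right'
--
--             if left > right:
--                 return 'right'
--             elif right > left:
--                 return 'left'
--             else:
--                 return 'same'
--             break
-- ===== SOURCE B (Python) =====
-- def whichExit(theater):
--     for row in theater: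
--         if 0 in row:
--             i = row.index(0)
--             left = row[:i].count(1)
--             right = row[i+1:].count(1)
--             if left > right:
--                 return 'right'
--             if right > left:
--                 return 'left'
--             return 'same'
-- ===== Notes on version B (the rewrite author's own statement) =====
-- stated objective: simpler
-- what changed: Replaces A's stateful single pass (left/right counters switched by a 'side' flag) with find-the-first-zero via index() and two independent count(1) calls on the slices before and after it.
import Mathlib
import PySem

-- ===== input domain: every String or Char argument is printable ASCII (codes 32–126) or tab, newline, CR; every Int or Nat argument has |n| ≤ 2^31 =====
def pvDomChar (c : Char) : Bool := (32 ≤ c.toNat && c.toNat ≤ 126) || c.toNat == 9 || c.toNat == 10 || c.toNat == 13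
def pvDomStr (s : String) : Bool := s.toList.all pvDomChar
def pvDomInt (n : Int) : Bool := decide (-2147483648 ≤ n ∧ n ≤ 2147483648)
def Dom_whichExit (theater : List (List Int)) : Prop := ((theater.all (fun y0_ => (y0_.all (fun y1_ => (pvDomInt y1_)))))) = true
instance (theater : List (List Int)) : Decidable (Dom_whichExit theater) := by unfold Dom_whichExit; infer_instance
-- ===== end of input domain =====

-- B replaces A's stateful single pass (side flag + two counters) by locating the first 0 with index()
-- and counting 1s on each slice independently; objective: simpler.


-- ===== PORT A =====
-- inner 'for person in row' loop with state (left, right, side)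
def whichExitLoopA : List Int → Int × Int × String → Int × Int × String
  | [], st => st
  | p :: rest, (l, r, s) =>
      whichExitLoopA rest
        (if p = 1 ∧ s = "left" then (l + 1, r, s)
         else if p = 1 ∧ s = "right" then (l, r + 1, s)
         else if p = 0 ∧ s = "left" then (l, r, "right")
         else (l, r, s))

def whichExit : List (List Int) → Option String
  | [] => none
  | row :: rest =>
      if (0 : Int) ∈ row then
        let st := whichExitLoopA row (0, 0, "left")
        if st.1 > st.2.1 then some "right"
        else if st.2.1 > st.1 then some "left"
        else some "same"
      else whichExit rest

-- ===== PORT B =====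
def whichExit_alt : List (List Int) → Option String
  | [] => none
  | row :: rest =>
      if (0 : Int) ∈ row then
        match PySem.List.index? row 0 with
        | some i =>
            let left := PySem.List.count (PySem.List.slice row none (some (i : Int))) 1
            let right := PySem.List.count (PySem.List.slice row (some ((i : Int) + 1)) none) 1
            if left > right then some "right"
            else if right > left then some "left"
            else some "same"
        | none => none   -- unreachable: 0 ∈ row
      else whichExit_alt rest

-- ===== PRECONDITION & SPEC =====
def Spec_whichExit (theater : List (List Int)) (out : Option String) : Prop := out = whichExit_alt theater
instance (theater : List (List Int)) (out : Option String) : Decidable (Spec_whichExit theater out) := by unfold Spec_whichExit; infer_instance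

-- ===== CLAIM (what is proved, stated in full; the proofs are below) =====
def Claim_equal_whichExit : Prop := ∀ (theater : List (List Int)), Dom_whichExit theater → Spec_whichExit theater (whichExit theater)

-- ===== LEMMAS AND PROOFS =====

-- after the first 0, side is "right" forever and only 1s bump the right counter
theorem loopA_right (xs : List Int) (l r : Int) :
    whichExitLoopA xs (l, r, "right") = (l, r + (xs.count 1 : Int), "right") := by
  induction xs generalizing r with
  | nil => simp [whichExitLoopA]
  | cons p rest ih =>
      by_cases hp : p = 1
      · subst hp
        simp [whichExitLoopA, ih, List.count_cons]
        push_cast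
        ring
      · simp [whichExitLoopA, hp, ih, List.count_cons]

-- before the first 0 (pre contains no 0), only 1s bump the left counter; the 0 flips the side
theorem loopA_left (pre suf : List Int) (h : (0 : Int) ∉ pre) (l r : Int) :
    whichExitLoopA (pre ++ 0 :: suf) (l, r, "left")
      = (l + (pre.count 1 : Int), r + (suf.count 1 : Int), "right") := by
  induction pre generalizing l with
  | nil => simp [whichExitLoopA, loopA_right]
  | cons p rest ih =>
      have hp0 : p ≠ 0 := fun hp => h (by simp [hp])
      have hrest : (0 : Int) ∉ rest := fun hm => h (by simp [hm])
      by_cases hp : p = 1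
      · subst hp
        simp only [List.cons_append, whichExitLoopA]
        simp only [and_self, if_true]
        rw [ih hrest]
        simp [List.count_cons]
        ring
      · simp only [List.cons_append, whichExitLoopA]
        rw [if_neg (by simp [hp]), if_neg (by simp [hp]), if_neg (by simp [hp0])]
        rw [ih hrest]
        simp [List.count_cons, hp]

theorem whichExit_spec : Claim_equal_whichExit := by
  unfold Claim_equal_whichExit
  intro theater _
  unfold Spec_whichExit
  clear ‹Dom_whichExit theater›
  induction theater with
  | nil => rfl
  | cons row rest ih =>
      by_cases hmem : (0 : Int) ∈ row
      · have hsome : (PySem.List.index? row 0).isSome := by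
          rw [PySem.List.index?_isSome_iff]; exact hmem
        obtain ⟨i, hi⟩ := Option.isSome_iff_exists.mp hsome
        obtain ⟨pre, suf, hrow, hlen, hnot⟩ := (PySem.List.index?_eq_some_iff ..).mp hi
        have hA : whichExitLoopA row (0, 0, "left")
            = ((pre.count 1 : Int), (suf.count 1 : Int), "right") := by
          rw [hrow, loopA_left pre suf hnot 0 0]; simp
        have hslice1 : PySem.List.slice row none (some (i : Int)) = pre := by
          rw [PySem.List.slice_to]
          simp [hrow, ← hlen, List.take_left']
          omega
        have hslice2 : PySem.List.slice row (some ((i : Int) + 1)) none = suf := by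
          rw [PySem.List.slice_from]
          have : ((i : Int) + 1).toNat = i + 1 := by omega
          rw [this, hrow, ← hlen, show pre ++ 0 :: suf = (pre ++ [0]) ++ suf by simp,
              List.drop_left' (by simp)]
          omega
        simp only [whichExit, whichExit_alt, if_pos hmem, hi, hA, hslice1, hslice2,
          PySem.List.count]
        simp only [gt_iff_lt]
        norm_cast
      · simpa [whichExit, whichExit_alt, hmem] using ih
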